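-- pv_equiv track=rewrite | github.com/g12m34/nl2sql_spider1 | scripts/analyze_models.py | find_common_failures
-- ===== SOURCE A (Python) =====
-- from collections import defaultdict
-- from typing import Dict, List, Set, Tuple
--
-- def find_common_failures(models: Dict[str, Dict]) -> Tuple[Set[int], Set[int], Dict[int, List[str]]]:
--     """Find questions that multiple models fail on."""
--     # Get failed questions per model
--     model_failures = {}
--     for model_name, data in models.items():
--         failed = set(e['question_id'] for e in data.get('errors', []))
--         model_failures[model_name] = failed
--
--     # Find common failures (failed by all models)
--     all_models = list(model_failures.keys())
--     if not all_models:
--         return set(), set(), {}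
--
--     common_failures = model_failures[all_models[0]].copy()
--     for model in all_models[1:]:
--         common_failures &= model_failures[model]
--
--     # Find unique successes (only one model got it right)
--     all_failures = set()
--     for fails in model_failures.values():
--         all_failures |= fails
--
--     # Track which models failed each question
--     question_failures = defaultdict(list)
--     for qid in all_failures:
--         for model_name, failed in model_failures.items():
--             if qid in failed:
--                 question_failures[qid].append(model_name)
--
--     return common_failures, all_failures, dict(question_failures)
-- ===== SOURCE B (Python) =====
-- def find_common_failures(models):
--     """Find questions that multiple models fail on."""
--     question_failures = {}
--     num_models = 0
--     for model_name, data in models.items():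
--         num_models += 1
--         seen = set()
--         for e in data.get('errors', []):
--             qid = e['question_id']
--             if qid not in seen:
--                 seen.add(qid)
--                 question_failures.setdefault(qid, []).append(model_name)
--     common_failures = {qid for qid, names in question_failures.items() if len(names) == num_models}
--     return common_failures, set(question_failures.keys()), question_failures
-- ===== Notes on version B (the rewrite author's own statement) =====
-- stated objective: alternative
-- what changed: A builds per-model failure sets, intersects them for common failures, unions them for all failures, and then for every failed question scans every model's set again; B makes a single pass over each model's error list, appending the model to a per-question failing-model list, and reads common failures (list length == number of models), all failures (the keys) and the per-question lists straight off that one dict (intended as faster; measured only ~1.2x at the largest size).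
import Mathlib
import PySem

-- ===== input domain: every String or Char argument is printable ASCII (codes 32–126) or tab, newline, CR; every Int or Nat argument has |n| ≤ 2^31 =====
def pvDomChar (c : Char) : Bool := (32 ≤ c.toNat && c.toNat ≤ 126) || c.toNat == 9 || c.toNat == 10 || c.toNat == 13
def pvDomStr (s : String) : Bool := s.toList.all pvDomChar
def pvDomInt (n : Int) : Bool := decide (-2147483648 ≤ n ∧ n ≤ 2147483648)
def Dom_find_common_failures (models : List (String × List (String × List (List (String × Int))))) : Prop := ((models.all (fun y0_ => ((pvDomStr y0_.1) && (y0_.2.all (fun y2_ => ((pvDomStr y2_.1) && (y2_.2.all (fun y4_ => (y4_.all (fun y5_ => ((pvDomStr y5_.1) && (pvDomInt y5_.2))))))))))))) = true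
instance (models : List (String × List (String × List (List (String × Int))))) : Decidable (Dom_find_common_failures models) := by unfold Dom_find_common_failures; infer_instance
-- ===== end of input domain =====

-- B replaces A's nested scan (for every failed question, scan every model's failure set) by a
-- single pass that appends each model to a per-question failing-model list while reading its
-- errors once, and reads all three results off that one dict.

-- ===== PORT A =====
-- data.get('errors', []) : the 'errors' entry of the data dict (first match), or []
def pvErrors (data : List (String × List (List (String × Int)))) : List (List (String × Int)) :=
  PySem.Dict.getD ⟨data⟩ "errors" []
-- e['question_id']; total form with default 0 — Pre_ excludes error dicts without the key (Python raises KeyError there)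
def pvQid (e : List (String × Int)) : Int :=
  (PySem.Dict.get? ⟨e⟩ "question_id").getD 0

def find_common_failures (models : List (String × List (String × List (List (String × Int))))) : List Int × List Int × (List (Int × List String)) :=
  -- model_failures[model_name] = set(e['question_id'] for e in data.get('errors', []))
  let model_failures : PySem.Dict String (PySem.Set Int) :=
    models.foldl (fun mf nd => mf.insert nd.1 (PySem.Set.ofList ((pvErrors nd.2).map pvQid))) PySem.Dict.empty
  match model_failures.keys with
  | [] => ([], [], [])                        -- if not all_models: return set(), set(), {}
  | m0 :: restModels =>
    -- common_failures = model_failures[all_models[0]].copy(); for model in all_models[1:]: common_failures &= …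
    let common_failures : PySem.Set Int :=
      restModels.foldl (fun c m => PySem.Set.inter c ((model_failures.get? m).getD []))
        ((model_failures.get? m0).getD [])
    -- all_failures = set(); for fails in model_failures.values(): all_failures |= fails
    let all_failures : PySem.Set Int :=
      model_failures.values.foldl (fun s fails => PySem.Set.union s fails) PySem.Set.empty
    -- question_failures = defaultdict(list); for qid in all_failures: for model_name, failed in …: if qid in failed: append
    let question_failures : PySem.Dict Int (List String) :=
      all_failures.foldl (fun qf qid =>
          model_failures.items.foldl (fun qf p =>
              if PySem.Set.contains p.2 qid then PySem.Dict.modify qf qid [] (· ++ [p.1]) else qf)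
            qf)
        PySem.Dict.empty
    (common_failures, all_failures, question_failures.items)

-- ===== PORT B =====
def find_common_failures_alt (models : List (String × List (String × List (List (String × Int))))) : List Int × List Int × (List (Int × List String)) :=
  -- single pass: question_failures.setdefault(qid, []).append(model_name) for each first occurrence
  let st : PySem.Dict Int (List String) × Int :=
    models.foldl (fun st nd =>
        let inner :=
          (pvErrors nd.2).foldl (fun (p : PySem.Dict Int (List String) × PySem.Set Int) e =>
              let qid := pvQid e
              if PySem.Set.contains p.2 qid then p
              else (PySem.Dict.modify p.1 qid [] (· ++ [nd.1]), PySem.Set.add p.2 qid))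
            (st.1, PySem.Set.empty)
        (inner.1, st.2 + 1))
      (PySem.Dict.empty, 0)
  let question_failures := st.1
  let num_models := st.2
  -- common_failures = {qid for qid, names in question_failures.items() if len(names) == num_models}
  let common_failures : PySem.Set Int :=
    PySem.Set.ofList ((question_failures.items.filter (fun p => (p.2.length : Int) == num_models)).map (·.1))
  (common_failures, PySem.Set.ofList question_failures.keys, question_failures.items)

-- ===== PRECONDITION & SPEC =====
-- Pre_ excludes association lists with duplicate keys at any dict level (they do not represent the
-- Python dicts A receives, whose keys are unique) and error dicts lacking the 'question_id' key
-- (there Python A raises KeyError).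
def Pre_find_common_failures (models : List (String × List (String × List (List (String × Int))))) : Prop :=
  (models.map (·.1)).Nodup ∧
  ∀ nd ∈ models, (nd.2.map (·.1)).Nodup ∧
    ∀ e ∈ pvErrors nd.2, (e.map (·.1)).Nodup ∧ "question_id" ∈ e.map (·.1)
instance (models : List (String × List (String × List (List (String × Int))))) : Decidable (Pre_find_common_failures models) := by unfold Pre_find_common_failures; infer_instance

def pvWitness_find_common_failures : (List (String × List (String × List (List (String × Int))))) :=
  [("m1", [("errors", [[("question_id", 1)], [("question_id", 2)]])]), ("m2", [("errors", [[("question_id", 2)]])])]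

def Spec_find_common_failures (models : List (String × List (String × List (List (String × Int))))) (out : List Int × List Int × (List (Int × List String))) : Prop := out = find_common_failures_alt models
instance (models : List (String × List (String × List (List (String × Int))))) (out : List Int × List Int × (List (Int × List String))) : Decidable (Spec_find_common_failures models out) := by unfold Spec_find_common_failures; infer_instance

-- ===== CLAIM (what is proved, stated in full; the proofs are below) =====
def Claim_equal_find_common_failures : Prop := ∀ (models : List (String × List (String × List (List (String × Int))))), Dom_find_common_failures models → Pre_find_common_failures models → Spec_find_common_failures models (find_common_failures models)

-- ===== LEMMAS AND PROOFS =====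

-- the per-model failure set and the list of (name, failure-set) pairs
def pvS (d : List (String × List (List (String × Int)))) : List Int :=
  PySem.Set.ofList ((pvErrors d).map pvQid)
def pvF (models : List (String × List (String × List (List (String × Int))))) : List (String × List Int) :=
  models.map (fun nd => (nd.1, pvS nd.2))

-- union of the failure sets of F, continued from s
def pvAllFrom (s : List Int) (F : List (String × List Int)) : List Int :=
  F.foldl (fun a p => PySem.Set.update a p.2) s
def pvAll (F : List (String × List Int)) : List Int := pvAllFrom [] F
-- the models whose failure set contains q, in order
def pvNames (F : List (String × List Int)) (q : Int) : List String :=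
  (F.filter (fun p => PySem.Set.contains p.2 q)).map (·.1)
-- the canonical question_failures dict
def pvCanon (F : List (String × List Int)) : PySem.Dict Int (List String) :=
  ⟨(pvAll F).map (fun q => (q, pvNames F q))⟩


-- membership in pvAllFrom
theorem pvAllFrom_mem (F : List (String × List Int)) : ∀ (s : List Int) (q : Int),
    q ∈ pvAllFrom s F ↔ q ∈ s ∨ ∃ p ∈ F, q ∈ p.2 := by
  induction F with
  | nil => intro s q; simp [pvAllFrom]
  | cons p G ih =>
    intro s q
    show q ∈ pvAllFrom (PySem.Set.update s p.2) G ↔ _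
    rw [ih]
    simp [PySem.Set.mem_update]
    tauto

theorem pvAllFrom_nodup (F : List (String × List Int)) : ∀ (s : List Int), s.Nodup → (pvAllFrom s F).Nodup := by
  induction F with
  | nil => intro s hs; exact hs
  | cons p G ih =>
    intro s hs
    exact ih _ (PySem.Set.nodup_update _ p.2 hs)

theorem pvAllFrom_decomp (F : List (String × List Int)) : ∀ (s : List Int),
    ∃ ext, pvAllFrom s F = s ++ ext ∧ ∀ x ∈ ext, x ∉ s := by
  induction F with
  | nil => intro s; exact ⟨[], by simp [pvAllFrom]⟩
  | cons p G ih =>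
    intro s
    obtain ⟨e2, he2, hni⟩ := ih (PySem.Set.update s p.2)
    refine ⟨(PySem.Set.ofList p.2).filter (fun y => !PySem.Set.contains s y) ++ e2, ?_, ?_⟩
    · show pvAllFrom (PySem.Set.update s p.2) G = _
      rw [he2, PySem.Set.update_eq_append_filter, List.append_assoc]
    · intro x hx
      rcases List.mem_append.1 hx with h | h
      · have := List.of_mem_filter h
        simpa [PySem.Set.contains, List.contains_eq_mem] using this
      · intro hxs
        exact hni x h (by rw [PySem.Set.update_eq_append_filter]; exact List.mem_append_left _ hxs)

theorem pvNames_ne_nil {F : List (String × List Int)} {q : Int} (h : q ∈ pvAll F) : pvNames F q ≠ [] := by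
  rw [pvAll, pvAllFrom_mem] at h
  rcases h with h | ⟨p, hp, hq⟩
  · simp at h
  · simp only [pvNames, ne_eq, List.map_eq_nil_iff, List.filter_eq_nil_iff]
    intro hc
    exact hc p hp (by simp [PySem.Set.contains, List.contains_eq_mem, hq])

theorem pvNames_eq_nil {F : List (String × List Int)} {q : Int} (h : q ∉ pvAll F) : pvNames F q = [] := by
  rw [pvAll, pvAllFrom_mem] at h
  push Not at h
  simp only [pvNames, List.map_eq_nil_iff, List.filter_eq_nil_iff]
  intro p hp hc
  exact absurd (h.2 p hp) (by simpa [PySem.Set.contains, List.contains_eq_mem] using hc)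

-- items of a modify (append to value) on a present key, under unique keys
theorem items_modify_mem (d : PySem.Dict Int (List String)) (q : Int) (n : String)
    (hd : d.keys.Nodup) (hc : d.contains q = true) :
    (PySem.Dict.modify d q [] (· ++ [n])).items
      = d.items.map (fun p => if p.1 == q then (p.1, p.2 ++ [n]) else p) := by
  show (d.insert q (d.getD q [] ++ [n])).items = _
  rw [PySem.Dict.items_insert_of_contains d _ hc]
  apply List.map_congr_left
  intro p hp
  by_cases h : p.1 = q
  · have hg : d.get? q = some p.2 := by
      have := PySem.Dict.get?_of_mem_items d (k := p.1) (v := p.2) (by simpa using hp) hd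
      rwa [h] at this
    simp [h, PySem.Dict.getD_eq_get?_getD, hg]
  · simp [h]

theorem items_modify_not_mem (d : PySem.Dict Int (List String)) (q : Int) (n : String)
    (hc : d.contains q = false) :
    (PySem.Dict.modify d q [] (· ++ [n])).items = d.items ++ [(q, [n])] := by
  show (d.insert q (d.getD q [] ++ [n])).items = _
  rw [PySem.Dict.getD_of_not_contains d _ hc, PySem.Dict.items_insert_of_not_contains d _ hc]
  rfl

theorem keys_modify_mem (d : PySem.Dict Int (List String)) (q : Int) (n : String)
    (hc : d.contains q = true) :
    (PySem.Dict.modify d q [] (· ++ [n])).keys = d.keys := by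
  rw [PySem.Dict.keys_modify]
  exact PySem.Dict.keys_insert_of_contains d _ hc

-- fold of per-question modifies over a Nodup list of questions
theorem modify_fold (n : String) : ∀ (s : List Int), s.Nodup →
    ∀ (d : PySem.Dict Int (List String)), d.keys.Nodup →
    s.foldl (fun d q => PySem.Dict.modify d q [] (· ++ [n])) d
      = ⟨d.items.map (fun p => if s.contains p.1 then (p.1, p.2 ++ [n]) else p)
          ++ (s.filter (fun q => !d.contains q)).map (fun q => (q, ([n] : List String)))⟩ := by
  intro s
  induction s with
  | nil =>
    intro _ d _
    apply PySem.Dict.ext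
    simp
  | cons q t ih =>
    intro hs d hd
    have hqt : q ∉ t := (List.nodup_cons.1 hs).1
    have ht : t.Nodup := (List.nodup_cons.1 hs).2
    simp only [List.foldl_cons]
    by_cases hc : d.contains q = true
    · set d' := PySem.Dict.modify d q [] (· ++ [n]) with hd'
      have hkeys : d'.keys = d.keys := keys_modify_mem d q n hc
      have hnd' : d'.keys.Nodup := by rw [hkeys]; exact hd
      rw [ih ht d' hnd']
      apply PySem.Dict.ext
      show d'.items.map _ ++ _ = _
      have hitems : d'.items = d.items.map (fun p => if p.1 == q then (p.1, p.2 ++ [n]) else p) :=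
        items_modify_mem d q n hd hc
      congr 1
      · rw [hitems, List.map_map]
        apply List.map_congr_left
        intro p hp
        by_cases h : p.1 = q
        · simp [h, List.contains_eq_mem, hqt]
        · simp only [Function.comp_apply, beq_iff_eq, h, if_false]
          by_cases h2 : p.1 ∈ t <;> simp [List.contains_eq_mem, h, h2]
      · have hdrop : (q :: t).filter (fun x => !d.contains x) = t.filter (fun x => !d.contains x) := by
          simp [hc]
        rw [hdrop]
        congr 1
        apply List.filter_congr
        intro x hx
        have hxq : x ≠ q := fun h => hqt (h ▸ hx)
        rw [hd']
        simp [PySem.Dict.contains_modify, hxq]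
    · have hc' : d.contains q = false := by simpa using hc
      set d' := PySem.Dict.modify d q [] (· ++ [n]) with hd'
      have hitems : d'.items = d.items ++ [(q, [n])] := items_modify_not_mem d q n hc'
      have hkeys : d'.keys = d.keys ++ [q] := by
        show d'.items.map _ = _
        rw [hitems]; simp [PySem.Dict.keys]
      have hnd' : d'.keys.Nodup := by
        rw [hkeys]
        refine List.Nodup.append hd (List.nodup_singleton q) ?_
        intro a ha hb
        simp only [List.mem_singleton] at hb
        subst hb
        have := (PySem.Dict.contains_iff_mem_keys d a).2 ha
        rw [hc'] at this
        exact Bool.false_ne_true this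
      rw [ih ht d' hnd']
      apply PySem.Dict.ext
      show d'.items.map _ ++ _ = _
      rw [hitems, List.map_append]
      have hq_not_keys : q ∉ d.keys := by
        intro h
        have := (PySem.Dict.contains_iff_mem_keys d q).2 h
        rw [hc'] at this
        exact Bool.false_ne_true this
      have hmap : (d.items.map (fun p => if t.contains p.1 then (p.1, p.2 ++ [n]) else p))
          = d.items.map (fun p => if (q :: t).contains p.1 then (p.1, p.2 ++ [n]) else p) := by
        apply List.map_congr_left
        intro p hp
        have hpk : p.1 ∈ d.keys := by
          unfold PySem.Dict.keys
          exact List.mem_map_of_mem hp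
        have hne : p.1 ≠ q := by
          intro h
          exact hq_not_keys (h ▸ hpk)
        simp [List.contains_eq_mem, hne]
      have hsingle : ([(q, [n])].map (fun p => if t.contains p.1 then (p.1, p.2 ++ [n]) else p)) = [(q, [n])] := by
        simp [List.contains_eq_mem, hqt]
      have hfilt : t.filter (fun x => !d'.contains x) = t.filter (fun x => !d.contains x) := by
        apply List.filter_congr
        intro x hx
        have hxq : x ≠ q := fun h => hqt (h ▸ hx)
        rw [hd']
        simp [PySem.Dict.contains_modify, hxq]
      rw [hmap, hsingle, hfilt]
      have hqfilt : (q :: t).filter (fun x => !d.contains x) = q :: t.filter (fun x => !d.contains x) := by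
        simp [hc']
      rw [hqfilt]
      simp

-- B's seen-guarded inner loop = plain modify-fold over the deduplicated qids
theorem guarded_fold (name : String) : ∀ (l : List Int) (qf : PySem.Dict Int (List String)) (s : PySem.Set Int),
    l.foldl (fun p q => if PySem.Set.contains p.2 q then p
        else (PySem.Dict.modify p.1 q [] (· ++ [name]), PySem.Set.add p.2 q)) (qf, s)
      = (((PySem.Set.ofList l).filter (fun q => !PySem.Set.contains s q)).foldl
            (fun d q => PySem.Dict.modify d q [] (· ++ [name])) qf,
          PySem.Set.update s l) := by
  intro l
  induction l with
  | nil => intro qf s; simp [PySem.Set.ofList, PySem.Set.update, PySem.Set.empty]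
  | cons q t ih =>
    intro qf s
    have hofl : PySem.Set.ofList (q :: t) = q :: (PySem.Set.ofList t).discard q := PySem.Set.ofList_cons q t
    by_cases hq : q ∈ s
    · have hc : PySem.Set.contains s q = true := by simp [PySem.Set.contains, List.contains_eq_mem, hq]
      rw [List.foldl_cons, hc, if_pos rfl, ih qf s]
      have h1 : PySem.Set.update s (q :: t) = PySem.Set.update s t := by
        show List.foldl PySem.Set.add s (q :: t) = _
        rw [List.foldl_cons, PySem.Set.add_of_mem hq]
        rfl
      rw [h1]
      have h2 : (PySem.Set.ofList (q :: t)).filter (fun x => !PySem.Set.contains s x)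
          = (PySem.Set.ofList t).filter (fun x => !PySem.Set.contains s x) := by
        rw [hofl, List.filter_cons]
        have : (!PySem.Set.contains s q) = false := by rw [hc]; rfl
        rw [this, if_neg (by simp)]
        show List.filter _ (List.filter _ _) = _
        rw [List.filter_filter]
        apply List.filter_congr
        intro y hy
        by_cases hyq : y = q
        · subst hyq
          simp [hq]
        · simp [hyq]
      rw [h2]
    · have hc : PySem.Set.contains s q = false := by simp [PySem.Set.contains, List.contains_eq_mem, hq]
      rw [List.foldl_cons, hc, if_neg (by simp), PySem.Set.add_of_not_mem hq,
        ih (qf.modify q [] (· ++ [name])) (s ++ [q])]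
      have h1 : PySem.Set.update s (q :: t) = PySem.Set.update (s ++ [q]) t := by
        show List.foldl PySem.Set.add s (q :: t) = _
        rw [List.foldl_cons, PySem.Set.add_of_not_mem hq]
        rfl
      rw [h1]
      have h2 : (PySem.Set.ofList (q :: t)).filter (fun x => !PySem.Set.contains s x)
          = q :: (PySem.Set.ofList t).filter (fun x => !PySem.Set.contains (s ++ [q]) x) := by
        rw [hofl, List.filter_cons]
        have : (!PySem.Set.contains s q) = true := by rw [hc]; rfl
        rw [this, if_pos rfl]
        congr 1
        show List.filter _ (List.filter _ _) = _
        rw [List.filter_filter]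
        apply List.filter_congr
        intro y hy
        by_cases hyq : y = q
        · subst hyq
          simp
        · simp [hyq, PySem.Set.contains, List.contains_eq_mem]
      rw [h2, List.foldl_cons]

-- keys of the canonical dict
theorem pvCanon_keys (F : List (String × List Int)) : (pvCanon F).keys = pvAll F := by
  show ((pvAll F).map (fun q => (q, pvNames F q))).map (fun x => x.1) = _
  rw [List.map_map]
  rw [show ((fun x : Int × List String => x.1) ∘ fun q => (q, pvNames F q)) = id from rfl, List.map_id]

theorem pvNames_append_single (G : List (String × List Int)) (n : String) (s : List Int) (q : Int) :
    pvNames (G ++ [(n, s)]) q = pvNames G q ++ (if s.contains q then [n] else []) := by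
  unfold pvNames
  rw [List.filter_append, List.map_append]
  congr 1
  by_cases h : s.contains q = true
  · have hm : q ∈ s := by simpa [List.contains_eq_mem] using h
    simp [PySem.Set.contains, List.contains_eq_mem, hm]
  · have hm : q ∉ s := by simpa [List.contains_eq_mem] using h
    simp [PySem.Set.contains, List.contains_eq_mem, hm]

theorem pvAll_append_single (G : List (String × List Int)) (n : String) (s : List Int) :
    pvAll (G ++ [(n, s)]) = PySem.Set.update (pvAll G) s := by
  unfold pvAll pvAllFrom
  rw [List.foldl_append]
  rfl

-- B's model loop builds the canonical dict
theorem foldB_canon : ∀ (F : List (String × List Int)), (∀ p ∈ F, p.2.Nodup) →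
    F.foldl (fun qf p => p.2.foldl (fun d q => PySem.Dict.modify d q [] (· ++ [p.1])) qf) PySem.Dict.empty
      = pvCanon F := by
  intro F
  induction F using List.reverseRecOn with
  | nil => intro _; apply PySem.Dict.ext; simp [pvCanon, pvAll, pvAllFrom, PySem.Dict.empty]
  | append_singleton G p ih =>
    intro hnd
    obtain ⟨n, s⟩ := p
    rw [List.foldl_append]
    rw [ih (fun r hr => hnd r (List.mem_append_left _ hr))]
    rw [List.foldl_cons, List.foldl_nil]
    have hs : s.Nodup := by
      have := hnd (n, s) (List.mem_append_right _ (List.mem_singleton_self _))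
      exact this
    have hk : (pvCanon G).keys.Nodup := by rw [pvCanon_keys]; exact pvAllFrom_nodup G [] (List.nodup_nil)
    rw [modify_fold n s hs (pvCanon G) hk]
    apply PySem.Dict.ext
    show _ ++ _ = (pvAll (G ++ [(n, s)])).map _
    rw [pvAll_append_single, PySem.Set.update_eq_append_filter, PySem.Set.ofList_eq_self_of_nodup s hs,
      List.map_append]
    congr 1
    · show ((pvAll G).map _).map _ = _
      rw [List.map_map]
      apply List.map_congr_left
      intro q hq
      have hnm : pvNames (G ++ [(n, s)]) q = pvNames G q ++ (if s.contains q then [n] else []) :=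
        pvNames_append_single G n s q
      by_cases hm : q ∈ s <;> simp [hnm, List.contains_eq_mem, hm]
    · have hfeq : (s.filter (fun q => !(pvCanon G).contains q))
          = s.filter (fun y => !PySem.Set.contains (pvAll G) y) := by
        apply List.filter_congr
        intro x hx
        rw [PySem.Dict.contains_eq_decide_mem_keys, pvCanon_keys]
        simp [PySem.Set.contains, List.contains_eq_mem]
      rw [← hfeq]
      apply List.map_congr_left
      intro q hq
      have hq2 := List.of_mem_filter hq
      have hqs : q ∈ s := List.mem_of_mem_filter hq
      have hnotall : q ∉ pvAll G := by
        rw [PySem.Dict.contains_eq_decide_mem_keys, pvCanon_keys] at hq2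
        simpa using hq2
      rw [pvNames_append_single G n s q, pvNames_eq_nil hnotall]
      simp [List.contains_eq_mem, hqs]

-- modify (append) on a dict decomposed around its unique q-entry
theorem modify_decomp (pre post : List (Int × List String)) (v : List String) (q : Int) (n : String)
    (hpre : q ∉ pre.map (·.1)) (hpost : q ∉ post.map (·.1)) :
    (⟨pre ++ (q, v) :: post⟩ : PySem.Dict Int (List String)).modify q [] (· ++ [n])
      = ⟨pre ++ (q, v ++ [n]) :: post⟩ := by
  have hfindpre : List.find? (fun p => p.1 == q) pre = none := by
    rw [List.find?_eq_none]
    intro x hx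
    simp only [beq_iff_eq]
    intro h
    exact hpre (h ▸ List.mem_map_of_mem hx)
  have hget : (⟨pre ++ (q, v) :: post⟩ : PySem.Dict Int (List String)).get? q = some v := by
    show (List.find? (fun p => p.1 == q) (pre ++ (q, v) :: post)).map (·.2) = some v
    rw [List.find?_append, hfindpre]
    simp
  have hcont : (⟨pre ++ (q, v) :: post⟩ : PySem.Dict Int (List String)).contains q = true := by
    show (pre ++ (q, v) :: post).any (fun p => p.1 == q) = true
    simp
  have hgd : (⟨pre ++ (q, v) :: post⟩ : PySem.Dict Int (List String)).getD q [] = v := by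
    rw [PySem.Dict.getD_eq_get?_getD, hget]
    rfl
  show (⟨pre ++ (q, v) :: post⟩ : PySem.Dict Int (List String)).insert q
      ((⟨pre ++ (q, v) :: post⟩ : PySem.Dict Int (List String)).getD q [] ++ [n]) = _
  rw [hgd]
  apply PySem.Dict.ext
  rw [PySem.Dict.items_insert_of_contains _ _ hcont]
  show (pre ++ (q, v) :: post).map _ = _
  rw [List.map_append, List.map_cons]
  have hpre' : pre.map (fun p => if (p.1 == q) = true then (q, v ++ [n]) else p) = pre := by
    trans pre.map id
    · apply List.map_congr_left
      intro x hx
      have : x.1 ≠ q := fun h => hpre (h ▸ List.mem_map_of_mem hx)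
      simp [this]
    · exact List.map_id pre
  have hpost' : post.map (fun p => if (p.1 == q) = true then (q, v ++ [n]) else p) = post := by
    trans post.map id
    · apply List.map_congr_left
      intro x hx
      have : x.1 ≠ q := fun h => hpost (h ▸ List.mem_map_of_mem hx)
      simp [this]
    · exact List.map_id post
  rw [hpre', hpost']
  simp

-- A's model_failures dict is just the association list pvF models (model names are unique)
theorem modelFailures_eq (models : List (String × List (String × List (List (String × Int)))))
    (h : (models.map (·.1)).Nodup) :
    models.foldl (fun mf nd => mf.insert nd.1 (PySem.Set.ofList ((pvErrors nd.2).map pvQid))) PySem.Dict.empty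
      = (⟨pvF models⟩ : PySem.Dict String (List Int)) := by
  apply PySem.Dict.ext
  rw [PySem.Dict.items_foldl_insert_fresh models (·.1) (fun nd => PySem.Set.ofList ((pvErrors nd.2).map pvQid))
    PySem.Dict.empty (fun a _ => PySem.Dict.contains_empty _) h]
  show [] ++ _ = _
  rw [List.nil_append]
  rfl

-- intersection chain = filter by membership in every set
theorem interfold (G : List (String × List Int)) : ∀ (c : PySem.Set Int),
    G.foldl (fun c p => PySem.Set.inter c p.2) c
      = c.filter (fun q => G.all (fun p => PySem.Set.contains p.2 q)) := by
  induction G with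
  | nil => intro c; simp
  | cons p T ih =>
    intro c
    rw [List.foldl_cons, ih]
    show List.filter _ (List.filter _ _) = _
    rw [List.filter_filter]
    apply List.filter_congr
    intro y hy
    simp [Bool.and_comm]

-- A's inner loop over the models, q already present in the dict (decomposed form)
theorem innerA_mem (q : Int) : ∀ (F : List (String × List Int)) (pre post : List (Int × List String)) (v : List String),
    q ∉ pre.map (·.1) → q ∉ post.map (·.1) →
    F.foldl (fun qf p => if PySem.Set.contains p.2 q then PySem.Dict.modify qf q [] (· ++ [p.1]) else qf)
        (⟨pre ++ (q, v) :: post⟩ : PySem.Dict Int (List String))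
      = ⟨pre ++ (q, v ++ pvNames F q) :: post⟩ := by
  intro F
  induction F with
  | nil => intro pre post v _ _; simp [pvNames]
  | cons p T ih =>
    intro pre post v hpre hpost
    rw [List.foldl_cons]
    by_cases hc : PySem.Set.contains p.2 q = true
    · rw [if_pos hc]
      rw [modify_decomp pre post v q p.1 hpre hpost, ih pre post (v ++ [p.1]) hpre hpost]
      have hm : q ∈ p.2 := by simpa [PySem.Set.contains, List.contains_eq_mem] using hc
      have : pvNames (p :: T) q = p.1 :: pvNames T q := by
        simp [pvNames, hm]
      rw [this]
      simp
    · rw [if_neg (by simpa using hc), ih pre post v hpre hpost]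
      have : pvNames (p :: T) q = pvNames T q := by
        simp only [pvNames, List.filter_cons, hc]
        simp
      rw [this]

theorem innerA_fresh (q : Int) : ∀ (F : List (String × List Int)) (d : PySem.Dict Int (List String)),
    q ∉ d.keys → pvNames F q ≠ [] →
    F.foldl (fun qf p => if PySem.Set.contains p.2 q then PySem.Dict.modify qf q [] (· ++ [p.1]) else qf) d
      = ⟨d.items ++ [(q, pvNames F q)]⟩ := by
  intro F
  induction F with
  | nil => intro d _ hne; exact absurd rfl hne
  | cons p T ih =>
    intro d hq hne
    rw [List.foldl_cons]
    by_cases hc : PySem.Set.contains p.2 q = true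
    · rw [if_pos hc]
      have hcont : d.contains q = false := by
        by_cases h : d.contains q = true
        · exact absurd ((PySem.Dict.contains_iff_mem_keys d q).1 h) hq
        · simpa using h
      have hd : PySem.Dict.modify d q [] (· ++ [p.1]) = ⟨d.items ++ [(q, [p.1])]⟩ := by
        apply PySem.Dict.ext
        exact items_modify_not_mem d q p.1 hcont
      rw [hd]
      have hres := innerA_mem q T d.items [] [p.1] hq (by simp)
      rw [show d.items ++ [(q, [p.1])] = d.items ++ (q, [p.1]) :: [] from rfl]
      rw [hres]
      have hm : q ∈ p.2 := by simpa [PySem.Set.contains, List.contains_eq_mem] using hc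
      have : pvNames (p :: T) q = p.1 :: pvNames T q := by
        simp [pvNames, hm]
      rw [this]
      simp
    · rw [if_neg (by simpa using hc)]
      have hm : q ∉ p.2 := by simpa [PySem.Set.contains, List.contains_eq_mem] using hc
      have hnm : pvNames (p :: T) q = pvNames T q := by
        simp [pvNames, hm]
      rw [hnm] at hne
      rw [ih d hq hne, hnm]

theorem outerA (F : List (String × List Int)) : ∀ (L M : List Int), (M ++ L).Nodup →
    (∀ x ∈ L, pvNames F x ≠ []) →
    L.foldl (fun qf q =>
        F.foldl (fun qf p => if PySem.Set.contains p.2 q then PySem.Dict.modify qf q [] (· ++ [p.1]) else qf) qf)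
      (⟨M.map (fun q => (q, pvNames F q))⟩ : PySem.Dict Int (List String))
      = ⟨(M ++ L).map (fun q => (q, pvNames F q))⟩ := by
  intro L
  induction L with
  | nil => intro M _ _; rw [List.foldl_nil, List.append_nil]
  | cons q T ih =>
    intro M hnd hmem
    rw [List.foldl_cons]
    have hqM : q ∉ M := by
      intro h
      exact List.disjoint_of_nodup_append hnd h List.mem_cons_self
    have hkeys : (⟨M.map (fun q => (q, pvNames F q))⟩ : PySem.Dict Int (List String)).keys = M := by
      show (M.map _).map _ = M
      rw [List.map_map]
      rw [show ((fun x : Int × List String => x.1) ∘ fun q => (q, pvNames F q)) = id from rfl, List.map_id]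
    rw [innerA_fresh q F _ (by rw [hkeys]; exact hqM) (hmem q List.mem_cons_self)]
    have : (⟨M.map (fun q => (q, pvNames F q))⟩ : PySem.Dict Int (List String)).items ++ [(q, pvNames F q)]
        = (M ++ [q]).map (fun q => (q, pvNames F q)) := by
      simp
    rw [this, ih (M ++ [q]) (by rwa [List.append_assoc, List.singleton_append])
      (fun x hx => hmem x (List.mem_cons_of_mem _ hx)), List.append_assoc, List.singleton_append]

-- B's per-model inner loop, reduced
theorem inner_reduce (nd : String × List (String × List (List (String × Int)))) (d : PySem.Dict Int (List String)) :
    ((pvErrors nd.2).foldl (fun (p : PySem.Dict Int (List String) × PySem.Set Int) e =>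
        if PySem.Set.contains p.2 (pvQid e) then p
        else (PySem.Dict.modify p.1 (pvQid e) [] (· ++ [nd.1]), PySem.Set.add p.2 (pvQid e))) (d, PySem.Set.empty)).1
      = (pvS nd.2).foldl (fun d q => PySem.Dict.modify d q [] (· ++ [nd.1])) d := by
  have hmap : ∀ (l : List (List (String × Int))) (acc : PySem.Dict Int (List String) × PySem.Set Int),
      l.foldl (fun p e =>
          if PySem.Set.contains p.2 (pvQid e) then p
          else (PySem.Dict.modify p.1 (pvQid e) [] (· ++ [nd.1]), PySem.Set.add p.2 (pvQid e))) acc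
        = (l.map pvQid).foldl (fun p q =>
          if PySem.Set.contains p.2 q then p
          else (PySem.Dict.modify p.1 q [] (· ++ [nd.1]), PySem.Set.add p.2 q)) acc := by
    intro l
    induction l with
    | nil => intro acc; rfl
    | cons e t iht => intro acc; rw [List.map_cons, List.foldl_cons, List.foldl_cons, iht]
  rw [hmap]
  rw [guarded_fold nd.1 ((pvErrors nd.2).map pvQid) d PySem.Set.empty]
  have hfil : (PySem.Set.ofList ((pvErrors nd.2).map pvQid)).filter (fun q => !PySem.Set.contains PySem.Set.empty q)
      = PySem.Set.ofList ((pvErrors nd.2).map pvQid) := by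
    apply List.filter_eq_self.2
    intro x hx
    rfl
  rw [hfil]
  rfl

theorem alt_fold (models : List (String × List (String × List (List (String × Int))))) : ∀ (d : PySem.Dict Int (List String)) (k : Int),
    models.foldl (fun st nd =>
        (((pvErrors nd.2).foldl (fun (p : PySem.Dict Int (List String) × PySem.Set Int) e =>
            if PySem.Set.contains p.2 (pvQid e) then p
            else (PySem.Dict.modify p.1 (pvQid e) [] (· ++ [nd.1]), PySem.Set.add p.2 (pvQid e))) (st.1, PySem.Set.empty)).1,
          st.2 + 1)) (d, k)
      = (models.foldl (fun d nd => (pvS nd.2).foldl (fun d q => PySem.Dict.modify d q [] (· ++ [nd.1])) d) d,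
          k + models.length) := by
  induction models with
  | nil => intro d k; simp
  | cons nd rest ih =>
    intro d k
    rw [List.foldl_cons, List.foldl_cons]
    have := inner_reduce nd d
    rw [show ((pvErrors nd.2).foldl (fun (p : PySem.Dict Int (List String) × PySem.Set Int) e =>
        if PySem.Set.contains p.2 (pvQid e) then p
        else (PySem.Dict.modify p.1 (pvQid e) [] (· ++ [nd.1]), PySem.Set.add p.2 (pvQid e))) ((d, k).1, PySem.Set.empty)).1
      = (pvS nd.2).foldl (fun d q => PySem.Dict.modify d q [] (· ++ [nd.1])) d from this]
    rw [ih]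
    have hlen : (k + 1) + (rest.length : Int) = k + ((nd :: rest).length : Int) := by
      simp only [List.length_cons]
      push_cast
      ring
    rw [hlen]

theorem B_char (models : List (String × List (String × List (List (String × Int))))) :
    find_common_failures_alt models =
      ( PySem.Set.ofList (((pvCanon (pvF models)).items.filter
            (fun p => (p.2.length : Int) == (models.length : Int))).map (·.1)),
        PySem.Set.ofList (pvCanon (pvF models)).keys,
        (pvCanon (pvF models)).items ) := by
  unfold find_common_failures_alt
  simp only []
  rw [alt_fold models PySem.Dict.empty 0]
  have hcanon : models.foldl (fun d nd => (pvS nd.2).foldl (fun d q => PySem.Dict.modify d q [] (· ++ [nd.1])) d) PySem.Dict.empty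
      = pvCanon (pvF models) := by
    have h1 : models.foldl (fun d nd => (pvS nd.2).foldl (fun d q => PySem.Dict.modify d q [] (· ++ [nd.1])) d) PySem.Dict.empty
        = (pvF models).foldl (fun qf p => p.2.foldl (fun d q => PySem.Dict.modify d q [] (· ++ [p.1])) qf) PySem.Dict.empty := by
      unfold pvF
      rw [List.foldl_map]
    rw [h1]
    apply foldB_canon
    intro p hp
    unfold pvF at hp
    obtain ⟨nd, _, rfl⟩ := List.mem_map.1 hp
    exact PySem.Set.nodup_ofList _
  rw [hcanon]
  norm_num

theorem A_char (nd : String × List (String × List (List (String × Int))))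
    (rest : List (String × List (String × List (List (String × Int)))))
    (h : ((nd :: rest).map (·.1)).Nodup) :
    find_common_failures (nd :: rest) =
      ( (pvS nd.2).filter (fun q => (pvF rest).all (fun p => PySem.Set.contains p.2 q)),
        pvAll (pvF (nd :: rest)),
        (pvCanon (pvF (nd :: rest))).items ) := by
  unfold find_common_failures
  simp only []
  rw [modelFailures_eq _ h]
  have hkeys : (⟨pvF (nd :: rest)⟩ : PySem.Dict String (List Int)).keys
      = nd.1 :: (pvF rest).map (·.1) := by
    show ((pvF (nd :: rest)).map (·.1)) = _
    simp [pvF]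
  rw [hkeys]
  show (((pvF rest).map (fun x => x.1)).foldl
        (fun c m => PySem.Set.inter c (((⟨pvF (nd :: rest)⟩ : PySem.Dict String (List Int)).get? m).getD []))
        (((⟨pvF (nd :: rest)⟩ : PySem.Dict String (List Int)).get? nd.1).getD []),
      (⟨pvF (nd :: rest)⟩ : PySem.Dict String (List Int)).values.foldl (fun s fails => PySem.Set.union s fails) PySem.Set.empty,
      (((⟨pvF (nd :: rest)⟩ : PySem.Dict String (List Int)).values.foldl (fun s fails => PySem.Set.union s fails) PySem.Set.empty).foldl
          (fun qf qid => (⟨pvF (nd :: rest)⟩ : PySem.Dict String (List Int)).items.foldl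
            (fun qf p => if PySem.Set.contains p.2 qid then PySem.Dict.modify qf qid [] (· ++ [p.1]) else qf) qf)
          PySem.Dict.empty).items)
    = _
  have hkeq : (⟨pvF (nd :: rest)⟩ : PySem.Dict String (List Int)).keys = (nd :: rest).map (·.1) := by
    show (pvF (nd :: rest)).map (·.1) = _
    simp [pvF]
  have hknd : (⟨pvF (nd :: rest)⟩ : PySem.Dict String (List Int)).keys.Nodup := by rw [hkeq]; exact h
  have hunion : (⟨pvF (nd :: rest)⟩ : PySem.Dict String (List Int)).values.foldl
      (fun s fails => PySem.Set.union s fails) PySem.Set.empty = pvAll (pvF (nd :: rest)) := by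
    show ((pvF (nd :: rest)).map (fun x => x.2)).foldl _ _ = _
    rw [List.foldl_map]
    rfl
  have hget0 : (⟨pvF (nd :: rest)⟩ : PySem.Dict String (List Int)).get? nd.1 = some (pvS nd.2) := by
    show (List.find? _ ((nd.1, pvS nd.2) :: List.map _ rest)).map _ = _
    rw [List.find?_cons_of_pos (by simp)]
    rfl
  have hcommon : ((pvF rest).map (fun x => x.1)).foldl
        (fun c m => PySem.Set.inter c (((⟨pvF (nd :: rest)⟩ : PySem.Dict String (List Int)).get? m).getD []))
        (((⟨pvF (nd :: rest)⟩ : PySem.Dict String (List Int)).get? nd.1).getD [])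
      = (pvS nd.2).filter (fun q => (pvF rest).all (fun p => PySem.Set.contains p.2 q)) := by
    rw [hget0, List.foldl_map]
    show (pvF rest).foldl _ (pvS nd.2) = _
    rw [PySem.List.foldl_congr_mem (pvF rest)
      (fun c p => PySem.Set.inter c (((⟨pvF (nd :: rest)⟩ : PySem.Dict String (List Int)).get? p.1).getD []))
      (fun c p => PySem.Set.inter c p.2) (pvS nd.2) ?_]
    · exact interfold (pvF rest) (pvS nd.2)
    · intro acc p hp
      have hmem : (p.1, p.2) ∈ pvF (nd :: rest) := by
        show (p.1, p.2) ∈ (nd.1, pvS nd.2) :: pvF rest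
        exact List.mem_cons_of_mem _ hp
      have hg := PySem.Dict.get?_of_mem_items (⟨pvF (nd :: rest)⟩ : PySem.Dict String (List Int)) hmem hknd
      show PySem.Set.inter acc (((⟨pvF (nd :: rest)⟩ : PySem.Dict String (List Int)).get? p.1).getD []) = PySem.Set.inter acc p.2
      rw [hg]
      rfl
  have hqf : (pvAll (pvF (nd :: rest))).foldl
        (fun qf qid => (⟨pvF (nd :: rest)⟩ : PySem.Dict String (List Int)).items.foldl
          (fun qf p => if PySem.Set.contains p.2 qid then PySem.Dict.modify qf qid [] (· ++ [p.1]) else qf) qf)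
        PySem.Dict.empty
      = pvCanon (pvF (nd :: rest)) := by
    have := outerA (pvF (nd :: rest)) (pvAll (pvF (nd :: rest))) []
      (by rw [List.nil_append]; exact pvAllFrom_nodup _ [] List.nodup_nil)
      (fun x hx => pvNames_ne_nil hx)
    rw [List.nil_append] at this
    exact this
  rw [hunion, hcommon, hqf]

-- ===== VERDICT (by name: the statement is the Claim_ definition above) =====
theorem find_common_failures_spec : Claim_equal_find_common_failures := by
  intro models hDom hPre
  unfold Spec_find_common_failures
  cases models with
  | nil => rfl
  | cons nd rest =>
    have h : ((nd :: rest).map (·.1)).Nodup := hPre.1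
    rw [A_char nd rest h, B_char (nd :: rest)]
    have hndall : (pvAll (pvF (nd :: rest))).Nodup := pvAllFrom_nodup _ [] List.nodup_nil
    refine Prod.ext ?_ (Prod.ext ?_ rfl)
    · -- common failures
      show (pvS nd.2).filter (fun q => (pvF rest).all (fun p => PySem.Set.contains p.2 q)) = _
      have hitems : (pvCanon (pvF (nd :: rest))).items.filter
            (fun p => (p.2.length : Int) == ((nd :: rest).length : Int))
          = ((pvAll (pvF (nd :: rest))).filter
              (fun q => ((pvNames (pvF (nd :: rest)) q).length : Int) == ((nd :: rest).length : Int))).map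
            (fun q => (q, pvNames (pvF (nd :: rest)) q)) := by
        show ((pvAll (pvF (nd :: rest))).map _).filter _ = _
        rw [List.filter_map]
        rfl
      have hp2 : ∀ q : Int, (((pvNames (pvF (nd :: rest)) q).length : Int) == ((nd :: rest).length : Int))
          = (pvF (nd :: rest)).all (fun p => PySem.Set.contains p.2 q) := by
        intro q
        have hlen : (pvNames (pvF (nd :: rest)) q).length
            = (pvF (nd :: rest)).countP (fun p => PySem.Set.contains p.2 q) := by
          simp [pvNames, List.countP_eq_length_filter]
        have hlenF : (pvF (nd :: rest)).length = (nd :: rest).length := by simp [pvF]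
        rw [hlen]
        by_cases hall : (pvF (nd :: rest)).all (fun p => PySem.Set.contains p.2 q) = true
        · rw [hall]
          have hc := List.countP_eq_length.2 (fun a ha => (List.all_eq_true.1 hall) a ha)
          rw [hc, hlenF]
          simp
        · have hb : (pvF (nd :: rest)).all (fun p => PySem.Set.contains p.2 q) = false := by
            simpa using hall
          rw [hb]
          have hne : (pvF (nd :: rest)).countP (fun p => PySem.Set.contains p.2 q)
              ≠ (pvF (nd :: rest)).length := by
            intro hceq
            exact hall (List.all_eq_true.2 (List.countP_eq_length.1 hceq))
          rw [← hlenF]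
          simp only [beq_eq_false_iff_ne, ne_eq, Int.natCast_inj]
          exact hne
      have hfilt2 : (pvAll (pvF (nd :: rest))).filter
            (fun q => ((pvNames (pvF (nd :: rest)) q).length : Int) == ((nd :: rest).length : Int))
          = (pvAll (pvF (nd :: rest))).filter
            (fun q => (pvF (nd :: rest)).all (fun p => PySem.Set.contains p.2 q)) :=
        List.filter_congr (fun q _ => hp2 q)
      rw [hitems, hfilt2, List.map_map]
      rw [show ((fun x : Int × List String => x.1) ∘ fun q => (q, pvNames (pvF (nd :: rest)) q)) = id from rfl,
        List.map_id]
      rw [PySem.Set.ofList_eq_self_of_nodup _ (List.Nodup.filter _ hndall)]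
      have hAf : pvAll (pvF (nd :: rest)) = pvAllFrom (pvS nd.2) (pvF rest) := by
        show pvAllFrom [] ((nd.1, pvS nd.2) :: pvF rest) = _
        unfold pvAllFrom
        rw [List.foldl_cons]
        congr 1
        show PySem.Set.update [] (pvS nd.2) = pvS nd.2
        rw [PySem.Set.update_nil_left]
        exact PySem.Set.ofList_ofList _
      obtain ⟨ext, hdec, hni⟩ := pvAllFrom_decomp (pvF rest) (pvS nd.2)
      rw [hAf, hdec, List.filter_append]
      have hext : ext.filter (fun q => (pvF (nd :: rest)).all (fun p => PySem.Set.contains p.2 q)) = [] := by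
        rw [List.filter_eq_nil_iff]
        intro x hx hcx
        have hhead := (List.all_eq_true.1 hcx) (nd.1, pvS nd.2) List.mem_cons_self
        have : x ∈ pvS nd.2 := by simpa [PySem.Set.contains, List.contains_eq_mem] using hhead
        exact hni x hx this
      rw [hext, List.append_nil]
      symm
      apply List.filter_congr
      intro q hq
      show (pvF (nd :: rest)).all _ = (pvF rest).all _
      rw [show pvF (nd :: rest) = (nd.1, pvS nd.2) :: pvF rest from rfl, List.all_cons]
      have : PySem.Set.contains (pvS nd.2) q = true := by
        simp [PySem.Set.contains, List.contains_eq_mem, hq]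
      rw [this, Bool.true_and]
    · -- all failures
      show pvAll (pvF (nd :: rest)) = PySem.Set.ofList (pvCanon (pvF (nd :: rest))).keys
      rw [pvCanon_keys, PySem.Set.ofList_eq_self_of_nodup _ hndall]
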